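-- pv_equiv track=rewrite | github.com/pypi-data/pypi-mirror-214 | packages/fastapi-all-out/fastapi_all_out-0.4.0.tar.gz/fastapi_all_out-0.4.0/fastapi_all_out/contrib/tortoise/repository.py | get_exclude_dict
-- ===== SOURCE A (Python) =====
-- from collections import defaultdict
--
-- def get_exclude_dict(fields: set[str]) -> dict[str, set[str]]:
--     """
--     Из {a, b, c.d, c.e, f.g.h, f.g.i} делает
--     {
--         '__root__': {'a', 'b'},
--         'c': {'d', 'e'},
--         'f': {'g.h', 'g.i'}
--     }
--     """
--     exclude_dict = defaultdict(set)
--     for field in fields: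
--         if '.' not in field:
--             exclude_dict['__root__'].add(field)
--         else:
--             base, _, field_in_related = field.partition('.')
--             exclude_dict[base].add(field_in_related)
--     return exclude_dict
-- ===== SOURCE B (Python) =====
-- from collections import defaultdict
--
--
-- def get_exclude_dict(fields):
--     def split(field):
--         base, sep, rest = field.partition('.')
--         return (base, rest) if sep else ('__root__', field)
--
--     pairs = [split(field) for field in fields]
--     keys = list(dict.fromkeys(base for base, _ in pairs))
--     result = defaultdict(set)
--     for key in keys:
--         result[key] = {rest for base, rest in pairs if base == key}
--     return result
-- ===== Notes on version B (the rewrite author's own statement) =====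
-- stated objective: alternative
-- what changed: Replaces A's single hashing pass that mutates per-key sets with a split-once pass producing (base, rest) pairs, an ordered key dedup, and a per-key comprehension scan that builds each group's set in one go.
import Mathlib
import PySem

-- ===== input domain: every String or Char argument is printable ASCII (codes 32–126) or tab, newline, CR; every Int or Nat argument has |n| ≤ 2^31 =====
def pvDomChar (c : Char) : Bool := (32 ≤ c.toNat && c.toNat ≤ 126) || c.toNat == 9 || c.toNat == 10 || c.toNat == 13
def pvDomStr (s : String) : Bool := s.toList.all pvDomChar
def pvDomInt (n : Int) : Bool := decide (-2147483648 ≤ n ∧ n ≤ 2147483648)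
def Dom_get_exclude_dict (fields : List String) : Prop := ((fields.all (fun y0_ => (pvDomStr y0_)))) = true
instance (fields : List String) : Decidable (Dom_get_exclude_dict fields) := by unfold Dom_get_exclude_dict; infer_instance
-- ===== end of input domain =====

-- B replaces A's single hashing pass that mutates per-key sets with a split-once pass,
-- an ordered key dedup, and a per-key scan building each group's set in one go (alternative, not faster).


-- ===== PORT A =====
def get_exclude_dict (fields : List String) : List (String × List String) :=
  (fields.foldl (fun d field =>
      if PySem.Str.isIn "." field = false then
        d.modify "__root__" PySem.Set.empty (fun s => PySem.Set.add s field)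
      else
        -- field.partition('.') in the branch where '.' occurs: split at the first '.' (exact)
        let i := PySem.Str.find field "."
        let base := PySem.Str.slice field none (some i)
        let field_in_related := PySem.Str.slice field (some (i + 1)) none
        d.modify base PySem.Set.empty (fun s => PySem.Set.add s field_in_related))
    PySem.Dict.empty).items

-- ===== PORT B =====
-- field.partition('.') with the "sep empty" test: find = -1 iff '.' not in field (exact)
def pvSplit (field : String) : String × String :=
  let i := PySem.Str.find field "."
  if i = -1 then ("__root__", field)
  else (PySem.Str.slice field none (some i), PySem.Str.slice field (some (i + 1)) none)

def get_exclude_dict_alt (fields : List String) : List (String × List String) :=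
  let pairs := fields.map pvSplit
  let keys := PySem.List.dedup (pairs.map (·.1))
  (keys.foldl (fun d k =>
      d.insert k (PySem.Set.ofList ((pairs.filter (fun p => p.1 == k)).map (·.2))))
    PySem.Dict.empty).items

-- ===== PRECONDITION & SPEC =====
def Spec_get_exclude_dict (fields : List String) (out : List (String × List String)) : Prop := out = get_exclude_dict_alt fields
instance (fields : List String) (out : List (String × List String)) : Decidable (Spec_get_exclude_dict fields out) := by unfold Spec_get_exclude_dict; infer_instance

-- ===== CLAIM (what is proved, stated in full; the proofs are below) =====
def Claim_equal_get_exclude_dict : Prop := ∀ (fields : List String), Dom_get_exclude_dict fields → Spec_get_exclude_dict fields (get_exclude_dict fields)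

-- ===== LEMMAS AND PROOFS =====

-- A's per-field step, rewritten through pvSplit (the two branch tests agree: '.' not in field ↔ find = -1)
theorem stepA_eq_split (d : PySem.Dict String (PySem.Set String)) (field : String) :
    (if PySem.Str.isIn "." field = false then
        d.modify "__root__" PySem.Set.empty (fun s => PySem.Set.add s field)
      else
        let i := PySem.Str.find field "."
        let base := PySem.Str.slice field none (some i)
        let field_in_related := PySem.Str.slice field (some (i + 1)) none
        d.modify base PySem.Set.empty (fun s => PySem.Set.add s field_in_related))
    = d.modify (pvSplit field).1 PySem.Set.empty (fun s => PySem.Set.add s (pvSplit field).2) := by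
  have h : PySem.Str.isIn "." field = false ↔ PySem.Str.find field "." = -1 := by
    rw [PySem.Str.find_eq_neg_one_iff, ← PySem.Str.isIn_iff_infix]
    exact Bool.eq_false_iff.trans (by simp)
  cases hb : PySem.Str.isIn "." field with
  | false =>
    have hfind : PySem.Str.find field "." = -1 := h.mp hb
    rw [if_pos rfl]
    simp only [pvSplit]
    rw [if_pos hfind]
  | true =>
    have hfind : ¬ PySem.Str.find field "." = -1 :=
      fun hc => absurd (hb.symm.trans (h.mpr hc)) (by decide)
    rw [if_neg (by decide)]
    simp only [pvSplit]
    rw [if_neg hfind]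

-- the grouping loop's value at one key: fold of Set.add over the key's suffixes, in order
theorem getD_foldl_modify_setAdd (l : List (String × String))
    (d : PySem.Dict String (PySem.Set String)) (c : String) :
    (l.foldl (fun d p => d.modify p.1 PySem.Set.empty (fun s => PySem.Set.add s p.2)) d).getD c PySem.Set.empty
    = (l.filter (fun p => p.1 == c)).foldl (fun s p => PySem.Set.add s p.2) (d.getD c PySem.Set.empty) := by
  induction l generalizing d with
  | nil => rfl
  | cons p t ih =>
    simp only [List.foldl_cons, List.filter_cons]
    rw [ih]
    by_cases hc : p.1 = c
    · have : (p.1 == c) = true := by simp [hc]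
      rw [this]
      simp only [List.foldl_cons]
      rw [PySem.Dict.getD_modify]
      simp [hc]
    · have : (p.1 == c) = false := by simp [hc]
      rw [this]
      rw [PySem.Dict.getD_modify]
      simp [Ne.symm hc]

theorem get_exclude_dict_eq (fields : List String) :
    get_exclude_dict fields = get_exclude_dict_alt fields := by
  unfold get_exclude_dict get_exclude_dict_alt
  -- rewrite A's fold into a fold over the (base, rest) pairs
  have hA : (fields.foldl (fun d field =>
      if PySem.Str.isIn "." field = false then
        d.modify "__root__" PySem.Set.empty (fun s => PySem.Set.add s field)
      else
        let i := PySem.Str.find field "."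
        let base := PySem.Str.slice field none (some i)
        let field_in_related := PySem.Str.slice field (some (i + 1)) none
        d.modify base PySem.Set.empty (fun s => PySem.Set.add s field_in_related))
      PySem.Dict.empty)
      = ((fields.map pvSplit).foldl
          (fun d p => d.modify p.1 PySem.Set.empty (fun s => PySem.Set.add s p.2))
          PySem.Dict.empty) := by
    rw [List.foldl_map]
    congr 1
    funext d field
    exact stepA_eq_split d field
  rw [hA]
  set pairs := fields.map pvSplit with hpairs
  -- A's dict: keys and per-key values
  have hnodup : ((pairs.foldl
      (fun d p => d.modify p.1 PySem.Set.empty (fun s => PySem.Set.add s p.2))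
      PySem.Dict.empty)).keys.Nodup :=
    PySem.Dict.nodup_keys_foldl_modify_key pairs Prod.fst PySem.Set.empty
      (fun _ p s => PySem.Set.add s p.2) PySem.Dict.empty (by simp [PySem.Dict.empty, PySem.Dict.keys])
  have hkeys : ((pairs.foldl
      (fun d p => d.modify p.1 PySem.Set.empty (fun s => PySem.Set.add s p.2))
      PySem.Dict.empty)).keys = PySem.List.dedup (pairs.map (·.1)) := by
    rw [PySem.Dict.keys_foldl_modify_key pairs Prod.fst PySem.Set.empty
      (fun _ p s => PySem.Set.add s p.2) PySem.Dict.empty]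
    rw [PySem.List.dedup_eq_ofList, PySem.Set.ofList_eq_foldl]
    rfl
  rw [PySem.Dict.items_eq_map_keys _ hnodup PySem.Set.empty, hkeys]
  -- B's dict: fresh distinct keys append their entries in order
  rw [PySem.Dict.items_foldl_insert_fresh (PySem.List.dedup (pairs.map (·.1)))
      (fun k => k)
      (fun k => PySem.Set.ofList ((pairs.filter (fun p => p.1 == k)).map (·.2)))
      PySem.Dict.empty
      (by intro a _; rfl)
      (by simp)]
  have hemptyitems : (PySem.Dict.empty : PySem.Dict String (PySem.Set String)).items = [] := rfl
  rw [hemptyitems, List.nil_append]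
  apply List.map_congr_left
  intro k _
  rw [getD_foldl_modify_setAdd]
  have hemptyD : (PySem.Dict.empty : PySem.Dict String (PySem.Set String)).getD k PySem.Set.empty
      = PySem.Set.empty := rfl
  rw [hemptyD, PySem.Set.ofList_eq_foldl, List.foldl_map]
  rfl

-- ===== VERDICT (by name: the statement is the Claim_ definition above) =====
theorem get_exclude_dict_spec : Claim_equal_get_exclude_dict := by
  intro fields _
  unfold Spec_get_exclude_dict
  exact get_exclude_dict_eq fields
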